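-- pv_equiv track=rewrite | github.com/abdulloh2025/botexperiment | tkinter2.py | harflarni_sana
-- ===== SOURCE A (Python) =====
-- from collections import Counter
--
-- def harflarni_sana(matn):
--     matn = matn.lower()
--     harflar = []
--     i = 0
--     while i < len(matn):
--         if matn[i:i+2] in ['sh', 'ch', 'ng']:
--             harflar.append(matn[i:i+2])
--             i += 2
--         elif matn[i].isalpha():
--             harflar.append(matn[i])
--             i += 1
--         else:
--             i += 1
--     return Counter(harflar)
-- ===== SOURCE B (Python) =====
-- import re
-- from collections import Counter
--
-- def harflarni_sana(matn):
--     matn = matn.lower()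
--     # greedy left-to-right: digraphs first, then any single char
--     tokens = re.findall(r'sh|ch|ng|.', matn, flags=re.DOTALL)
--     return Counter(t for t in tokens if len(t) == 2 or t.isalpha())
-- ===== Notes on version B (the rewrite author's own statement) =====
-- stated objective: idiomatic
-- what changed: Replaces the manual index/while scanner that filters while scanning with a regex tokenization (re.findall(r'sh|ch|ng|.', ...)) followed by a filter and a single Counter construction.
import Mathlib
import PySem

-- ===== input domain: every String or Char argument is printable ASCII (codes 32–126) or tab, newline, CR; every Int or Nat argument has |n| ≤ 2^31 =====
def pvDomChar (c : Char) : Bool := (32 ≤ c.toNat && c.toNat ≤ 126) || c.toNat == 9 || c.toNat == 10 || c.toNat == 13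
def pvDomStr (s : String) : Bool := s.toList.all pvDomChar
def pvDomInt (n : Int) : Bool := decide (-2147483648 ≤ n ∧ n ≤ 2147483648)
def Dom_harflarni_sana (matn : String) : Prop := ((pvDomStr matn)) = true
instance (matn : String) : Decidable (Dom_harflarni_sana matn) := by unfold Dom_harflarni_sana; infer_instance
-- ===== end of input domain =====

-- B replaces A's while-loop scanner (filtering as it scans) by regex tokenization then filter then Counter; idiomatic, same cost.

-- ===== PORT A =====
-- the while loop over index i, transliterated as recursion on the remaining characters;
-- matn[i:i+2] is 'a :: rest.take 1', advancing i by 2 is 'rest.drop 1'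
def pvScanA : List Char → List String
  | [] => []
  | a :: rest =>
    if String.ofList (a :: rest.take 1) ∈ ["sh", "ch", "ng"] then
      String.ofList (a :: rest.take 1) :: pvScanA (rest.drop 1)
    else if PySem.Chars.strIsalpha [a] then
      String.ofList [a] :: pvScanA rest
    else
      pvScanA rest
  termination_by cs => cs.length
  decreasing_by all_goals simp

def harflarni_sana (matn : String) : List (String × Int) :=
  (PySem.Dict.counter (pvScanA (PySem.Str.lower matn).toList)).items

-- ===== PORT B =====
-- re.findall(r'sh|ch|ng|.', matn, re.DOTALL): hand-ported tokenizer, exact for this regex —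
-- greedy left-to-right alternation: a digraph if one starts here, else one arbitrary character
def pvTokB : List Char → List String
  | [] => []
  | [a] => [String.ofList [a]]
  | a :: b :: t =>
    if String.ofList [a, b] ∈ ["sh", "ch", "ng"] then
      String.ofList [a, b] :: pvTokB t
    else
      String.ofList [a] :: pvTokB (b :: t)

def harflarni_sana_alt (matn : String) : List (String × Int) :=
  (PySem.Dict.counter
    ((pvTokB (PySem.Str.lower matn).toList).filter
      (fun t => PySem.Str.len t == 2 || PySem.Str.strIsalpha t))).items

-- ===== PRECONDITION & SPEC =====
def Spec_harflarni_sana (matn : String) (out : List (String × Int)) : Prop := out = harflarni_sana_alt matn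
instance (matn : String) (out : List (String × Int)) : Decidable (Spec_harflarni_sana matn out) := by unfold Spec_harflarni_sana; infer_instance

-- ===== CLAIM (what is proved, stated in full; the proofs are below) =====
def Claim_equal_harflarni_sana : Prop := ∀ (matn : String), Dom_harflarni_sana matn → Spec_harflarni_sana matn (harflarni_sana matn)

-- ===== LEMMAS AND PROOFS =====
theorem pvScanA_eq_filter_tokB (cs : List Char) :
    pvScanA cs = (pvTokB cs).filter (fun t => PySem.Str.len t == 2 || PySem.Str.strIsalpha t) := by
  induction cs using pvTokB.induct with
  | case1 => simp [pvScanA, pvTokB]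
  | case2 a =>
      have hne : String.ofList [a] ∉ ["sh", "ch", "ng"] := by
        intro h
        simp only [List.mem_cons, List.not_mem_nil, or_false] at h
        rcases h with h | h | h <;>
          · have := congrArg String.toList h
            simp at this
      simp [pvScanA, pvTokB, hne, PySem.Str.len, PySem.Str.strIsalpha, List.filter_cons]
  | case3 a b t h ih =>
      simp [pvScanA, pvTokB, h, ih, PySem.Str.len]
  | case4 a b t h ih =>
      simp [pvScanA, pvTokB, h, ih, PySem.Str.len, PySem.Str.strIsalpha, List.filter_cons]

-- ===== VERDICT (by name: the statement is the Claim_ definition above) =====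
theorem harflarni_sana_spec : Claim_equal_harflarni_sana := by
  intro matn _
  unfold Spec_harflarni_sana harflarni_sana harflarni_sana_alt
  rw [pvScanA_eq_filter_tokB]
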